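-- pv_equiv track=rewrite | github.com/salonisaxenatud/Wordle-solver-maybe | highest-freq-word-starter.py | find_highest_freq_word
-- ===== SOURCE A (Python) =====
-- def find_highest_freq_word(word_list, sorted_letters):
--     highest_freq_word = ''
--     highest_freq_count = 0
--     for word in word_list:
--         freq_count = sum([word.count(letter[0]) * letter[1] for letter in sorted_letters])
--         if freq_count > highest_freq_count and len(set(word)) == len(word):
--             highest_freq_count = freq_count
--             highest_freq_word = word
--     return highest_freq_word, highest_freq_count
-- ===== SOURCE B (Python) =====
-- def find_highest_freq_word(word_list, sorted_letters):
--     scored = [(sum(w.count(k) * v for k, v in sorted_letters), w)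
--               for w in word_list if len(set(w)) == len(w)]
--     ranked = sorted(scored, key=lambda p: -p[0])
--     if ranked and ranked[0][0] > 0:
--         return ranked[0][1], ranked[0][0]
--     return '', 0
-- ===== Notes on version B (the rewrite author's own statement) =====
-- stated objective: alternative
-- what changed: A's single running-max scan with two mutable accumulators is replaced by a build-table-then-sort strategy: a (score, word) table for distinct-letter words, a stable descending sort by score (ties keep original order, matching A's first-maximum rule), then the head with a >0 threshold.
import Mathlib
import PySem

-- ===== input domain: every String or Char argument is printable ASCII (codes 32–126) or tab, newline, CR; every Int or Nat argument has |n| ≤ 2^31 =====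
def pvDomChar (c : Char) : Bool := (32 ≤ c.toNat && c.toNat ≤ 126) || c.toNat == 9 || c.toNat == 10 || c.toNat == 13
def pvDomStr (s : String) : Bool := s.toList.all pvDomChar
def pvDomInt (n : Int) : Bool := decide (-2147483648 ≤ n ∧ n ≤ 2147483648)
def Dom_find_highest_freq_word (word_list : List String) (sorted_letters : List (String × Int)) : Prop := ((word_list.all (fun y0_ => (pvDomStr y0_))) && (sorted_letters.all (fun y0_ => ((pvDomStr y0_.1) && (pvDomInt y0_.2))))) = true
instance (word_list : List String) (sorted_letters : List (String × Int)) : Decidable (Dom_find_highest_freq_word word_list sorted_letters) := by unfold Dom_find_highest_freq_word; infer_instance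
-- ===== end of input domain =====

-- B replaces A's single running-max scan by a build-table-then-sort strategy: a (score, word)
-- table for distinct-letter words, a stable descending sort by score, then the head with a >0
-- threshold; objective: alternative (same result, not faster).

-- ===== PORT A =====
def find_highest_freq_word (word_list : List String) (sorted_letters : List (String × Int)) : String × Int :=
  word_list.foldl
    (fun acc word =>
      let freq_count : Int :=
        (sorted_letters.map (fun letter => (PySem.Str.count word letter.1 : Int) * letter.2)).sum
      if freq_count > acc.2 ∧ PySem.Set.len (PySem.Set.ofList word.toList) = PySem.Str.len word then
        (word, freq_count)
      else acc)
    ("", 0)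

-- ===== PORT B =====
-- 'if ranked and ranked[0][0] > 0: return ranked[0][1], ranked[0][0]; return '', 0' as a head helper
def pvPick (ranked : List (Int × String)) : String × Int :=
  match ranked with
  | [] => ("", 0)
  | p :: _ => if p.1 > 0 then (p.2, p.1) else ("", 0)

def find_highest_freq_word_alt (word_list : List String) (sorted_letters : List (String × Int)) : String × Int :=
  let scored :=
    (word_list.filter
        (fun w => decide (PySem.Set.len (PySem.Set.ofList w.toList) = PySem.Str.len w))).map
      (fun w => ((sorted_letters.map (fun kv => (PySem.Str.count w kv.1 : Int) * kv.2)).sum, w))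
  let ranked := PySem.List.sorted scored (fun p => -p.1) false
  pvPick ranked

-- ===== PRECONDITION & SPEC =====
def Spec_find_highest_freq_word (word_list : List String) (sorted_letters : List (String × Int)) (out : String × Int) : Prop := out = find_highest_freq_word_alt word_list sorted_letters
instance (word_list : List String) (sorted_letters : List (String × Int)) (out : String × Int) : Decidable (Spec_find_highest_freq_word word_list sorted_letters out) := by unfold Spec_find_highest_freq_word; infer_instance

-- ===== CLAIM (what is proved, stated in full; the proofs are below) =====
def Claim_equal_find_highest_freq_word : Prop := ∀ (word_list : List String) (sorted_letters : List (String × Int)), Dom_find_highest_freq_word word_list sorted_letters → Spec_find_highest_freq_word word_list sorted_letters (find_highest_freq_word word_list sorted_letters)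

-- ===== LEMMAS AND PROOFS =====

-- Python's max(key)'s first-maximal fold, head exposed
theorem pv_max_cons (t : List (String × Int)) (m : String × Int) :
    PySem.List.max? (m :: t) (fun p => p.2)
      = some (t.foldl (fun acc p => if acc.2 < p.2 then p else acc) m) := by
  induction t generalizing m with
  | nil => rfl
  | cons p t ih =>
    have h : PySem.List.max? (m :: p :: t) (fun p : String × Int => p.2)
        = PySem.List.max? ((if m.2 < p.2 then p else m) :: t) (fun p : String × Int => p.2) := by
      by_cases hmp : m.2 < p.2 <;> simp [PySem.List.max?, hmp]
    rw [h, ih, List.foldl_cons]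

-- the strict running-max loop is "first maximal element, if it beats the start"
theorem pv_foldl_max (t : List (String × Int)) (i : String × Int) :
    t.foldl (fun acc p => if acc.2 < p.2 then p else acc) i
      = if i.2 < ((PySem.List.max? t (fun p => p.2)).getD i).2
        then (PySem.List.max? t (fun p => p.2)).getD i else i := by
  induction t generalizing i with
  | nil => simp [PySem.List.max?]
  | cons p t ih =>
    simp only [List.foldl_cons, pv_max_cons, ih, Option.getD_some]
    rcases hmt : PySem.List.max? t (fun p : String × Int => p.2) with _ | m
    · simp only [Option.getD_none]
      split_ifs <;> rfl
    · simp only [Option.getD_some]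
      split_ifs <;> first | rfl | omega

-- A's loop, with the distinct-letters test hoisted into a filter and the score into a map
theorem find_highest_freq_word_eq_fold (word_list : List String)
    (sorted_letters : List (String × Int)) :
    find_highest_freq_word word_list sorted_letters
      = ((word_list.filter
            (fun w => decide (PySem.Set.len (PySem.Set.ofList w.toList) = PySem.Str.len w))).map
          (fun w => (w, (sorted_letters.map (fun kv => (PySem.Str.count w kv.1 : Int) * kv.2)).sum))).foldl
          (fun acc p => if acc.2 < p.2 then p else acc) ("", 0) := by
  unfold find_highest_freq_word
  rw [List.foldl_map, ← PySem.List.foldl_if_eq_foldl_filter]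
  refine PySem.List.foldl_congr_mem _ _ _ _ ?_
  intro acc w _
  dsimp only
  simp only [gt_iff_lt, decide_eq_true_eq]
  split_ifs <;> first | rfl | tauto

-- inserting into a nonempty stable descending-by-score list touches the head by the running-max rule
theorem pv_insertBy_head (x m : Int × String) (rest : List (Int × String)) :
    ∃ r, PySem.List.insertBy (fun a b : Int × String => decide (-a.1 < -b.1)) x (m :: rest)
      = (if m.1 < x.1 then x else m) :: r := by
  by_cases h : m.1 < x.1
  · exact ⟨m :: rest, by simp [PySem.List.insertBy, h]⟩
  · refine ⟨PySem.List.insertBy (fun a b : Int × String => decide (-a.1 < -b.1)) x rest, ?_⟩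
    simp [PySem.List.insertBy, h, show ¬ (-x.1 < -m.1) by omega]

-- the head of the insertion-sort fold is the running maximum of the processed words
theorem pv_foldl_insertBy_head (t : List (Int × String)) (m : Int × String)
    (rest : List (Int × String)) :
    ∃ r, t.foldl
        (fun acc x => PySem.List.insertBy (fun a b : Int × String => decide (-a.1 < -b.1)) x acc)
        (m :: rest)
      = (t.foldl (fun acc p => if acc.1 < p.1 then p else acc) m) :: r := by
  induction t generalizing m rest with
  | nil => exact ⟨rest, rfl⟩
  | cons x t ih =>
    obtain ⟨r, hr⟩ := pv_insertBy_head x m rest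
    simp only [List.foldl_cons, hr]
    exact ih _ r

-- head of the stable descending sort = first maximal element (Python's max)
theorem pv_sorted_head (l : List (Int × String)) :
    (PySem.List.sorted l (fun p => -p.1) false).head?
      = (PySem.List.max? (l.map (fun p => (p.2, p.1))) (fun p => p.2)).map (fun p => (p.2, p.1)) := by
  cases l with
  | nil => rfl
  | cons c t =>
    rw [PySem.List.sorted_eq_foldl_insertBy]
    simp only [List.foldl_cons, List.map_cons]
    have e : PySem.List.insertBy (fun a b : Int × String => decide (-a.1 < -b.1)) c [] = [c] := rfl
    rw [e]
    obtain ⟨r, hr⟩ := pv_foldl_insertBy_head t c []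
    rw [hr, pv_max_cons, List.foldl_map]
    have key : ∀ (t : List (Int × String)) (c : Int × String),
        t.foldl (fun (acc : String × Int) p => if acc.2 < (p.2, p.1).2 then (p.2, p.1) else acc) (c.2, c.1)
          = ((t.foldl (fun acc p => if acc.1 < p.1 then p else acc) c).2,
             (t.foldl (fun acc p => if acc.1 < p.1 then p else acc) c).1) := by
      intro t
      induction t with
      | nil => intro c; rfl
      | cons p t ih =>
        intro c
        simp only [List.foldl_cons]
        by_cases h : c.1 < p.1 <;> simp only [h, if_pos, if_false] <;> rw [ih]
    rw [key, Option.map_some]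
    simp

-- taking the head of the stable descending sort (with the >0 threshold) is A's running-max loop
theorem pv_sort_pick (l : List (Int × String)) :
    pvPick (PySem.List.sorted l (fun p => -p.1) false)
      = (l.map (fun p => (p.2, p.1))).foldl
          (fun acc p => if acc.2 < p.2 then p else acc) ("", 0) := by
  rw [pv_foldl_max]
  have hh := pv_sorted_head l
  rcases hs : PySem.List.sorted l (fun p => -p.1) false with _ | ⟨p, rest⟩
  · rw [hs] at hh
    rcases hm : PySem.List.max? (l.map (fun p => (p.2, p.1))) (fun p => p.2) with _ | m
    · rw [hm]; simp [pvPick]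
    · rw [hm] at hh; simp at hh
  · rw [hs] at hh
    rcases hm : PySem.List.max? (l.map (fun p => (p.2, p.1))) (fun p => p.2) with _ | m
    · rw [hm] at hh; simp at hh
    · rw [hm] at hh
      simp only [Option.map_some, List.head?_cons, Option.some_inj] at hh
      subst hh
      rw [hm]
      simp only [pvPick, Option.getD_some, gt_iff_lt]

-- ===== VERDICT (by name: the statement is the Claim_ definition above) =====
theorem find_highest_freq_word_spec : Claim_equal_find_highest_freq_word := by
  intro word_list sorted_letters _
  unfold Spec_find_highest_freq_word
  simp only [find_highest_freq_word_alt]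
  rw [pv_sort_pick, find_highest_freq_word_eq_fold, List.map_map]
  rfl
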